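-- pv_equiv track=rewrite | github.com/eliottcassidy2000/math | 04-computation/h21_poisoning_graph.py | compute_poisoning_graph
-- ===== SOURCE A (Python) =====
-- def get_vertex_3cycles(cycle_sets, v):
--     """All 3-cycle sets containing vertex v."""
--     return [c for c in cycle_sets if v in c]
--
-- def compute_poisoning_graph(cycle_sets, R, AB):
--     """
--     Compute poisoning graph on R.
--     w -> v iff ALL of w's 3-cycles contain v.
--     """
--     edges = {}  # w -> v
--     S = set()  # vertices with out-degree 0 (have 3-cycle in {w}∪AB)
--
--     for w in R:
--         w_cycles = get_vertex_3cycles(cycle_sets, w)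
--         if not w_cycles:
--             continue
--
--         # Check if w has a 3-cycle within {w}∪AB (not using any R vertex besides w)
--         has_ab_cycle = False
--         for c in w_cycles:
--             if c <= ({w} | AB):
--                 has_ab_cycle = True
--                 break
--
--         if has_ab_cycle:
--             S.add(w)
--             continue
--
--         # All w's 3-cycles use some R vertex besides w
--         # Find the common R vertex (if unique)
--         common_r = None
--         for c in w_cycles:
--             r_in_c = (c - {w}) & set(R)
--             if common_r is None:
--                 common_r = r_in_c
--             else:
--                 common_r = common_r & r_in_c
--
--         if len(common_r) == 1:
--             target = list(common_r)[0]
--             edges[w] = target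
--         elif len(common_r) == 0:
--             # w's 3-cycles go through different R vertices
--             S.add(w)  # No single dependency
--
--     return edges, S
-- ===== SOURCE B (Python) =====
-- def compute_poisoning_graph(cycle_sets, R, AB):
--     """
--     Compute poisoning graph on R.
--     w -> v iff ALL of w's 3-cycles contain v.
--     Cycle-major: one pass over cycle_sets aggregates, per vertex v, whether
--     some cycle of v lies within {v}|AB and the intersection of all of v's
--     cycles; a second pass over R then reads off each w's answer, instead of
--     rescanning all of cycle_sets for every w.
--     """
--     Rset = set(R)
--     agg = {}  # v -> (has cycle inside {v}|AB, intersection of v's cycles)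
--     for c in cycle_sets:
--         d = c - AB
--         for v in c:
--             b, I = agg.get(v, (False, c))
--             agg[v] = (b or d <= {v}, I & c)
--     edges = {}
--     S = set()
--     for w in R:
--         got = agg.get(w)
--         if got is None:
--             continue
--         b, I = got
--         if b:
--             S.add(w)
--             continue
--         cr = (I - {w}) & Rset
--         if len(cr) == 1:
--             (edges[w],) = cr
--         elif not cr:
--             S.add(w)
--     return edges, S
-- ===== Notes on version B (the rewrite author's own statement) =====
-- stated objective: faster
-- what changed: Instead of rescanning all of cycle_sets for every w in R (filter, an any-pass and an intersection pass per w), B makes one cycle-major pass that aggregates per vertex a (has-AB-cycle, intersection-of-its-cycles) pair in a dict, then answers each w by a single dict lookup.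
import Mathlib
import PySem

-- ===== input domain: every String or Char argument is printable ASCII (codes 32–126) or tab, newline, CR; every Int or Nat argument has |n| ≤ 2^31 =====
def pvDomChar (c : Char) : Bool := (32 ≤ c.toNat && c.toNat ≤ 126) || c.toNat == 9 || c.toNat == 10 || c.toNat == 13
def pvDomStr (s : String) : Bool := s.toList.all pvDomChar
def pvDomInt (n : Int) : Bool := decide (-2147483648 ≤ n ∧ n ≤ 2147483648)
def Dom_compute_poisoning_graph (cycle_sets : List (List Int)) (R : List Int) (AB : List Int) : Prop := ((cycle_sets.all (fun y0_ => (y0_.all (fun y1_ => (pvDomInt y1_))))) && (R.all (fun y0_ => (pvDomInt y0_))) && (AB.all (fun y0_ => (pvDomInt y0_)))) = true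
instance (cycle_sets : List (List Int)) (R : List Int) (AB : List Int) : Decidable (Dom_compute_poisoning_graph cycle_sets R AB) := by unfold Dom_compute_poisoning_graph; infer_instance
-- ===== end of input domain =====

-- B replaces A's per-w rescans of cycle_sets by ONE cycle-major aggregation pass plus a dict lookup per w.

-- ===== PORT A =====
def get_vertex_3cycles (cycle_sets : List (List Int)) (v : Int) : List (List Int) :=
  cycle_sets.filter (fun c => PySem.Set.contains c v)

def compute_poisoning_graph (cycle_sets : List (List Int)) (R : List Int) (AB : List Int) : (List (Int × Int)) × List Int :=
  let res := R.foldl (fun (st : PySem.Dict Int Int × PySem.Set Int) w =>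
    let w_cycles := get_vertex_3cycles cycle_sets w
    if w_cycles.isEmpty then st
    else if w_cycles.any (fun c => PySem.Set.issubset c (PySem.Set.union (PySem.Set.add PySem.Set.empty w) AB)) then
      (st.1, PySem.Set.add st.2 w)
    else
      let common_r := w_cycles.foldl (fun (acc : Option (List Int)) c =>
        let r_in_c := PySem.Set.inter (PySem.Set.diff c (PySem.Set.add PySem.Set.empty w)) (PySem.Set.ofList R)
        match acc with
        | none => some r_in_c
        | some s => some (PySem.Set.inter s r_in_c)) none
      match common_r with
      | some s =>
        if s.length = 1 then (st.1.insert w s.headI, st.2)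
        else if s.length = 0 then (st.1, PySem.Set.add st.2 w)
        else st
      | none => st   -- unreachable: w_cycles ≠ []
    ) (PySem.Dict.empty, PySem.Set.empty)
  ((res.1).items, res.2)

-- ===== PORT B =====
def cpgStep (AB : List Int) (agg : PySem.Dict Int (Bool × List Int)) (c : List Int) : PySem.Dict Int (Bool × List Int) :=
  let d := PySem.Set.diff c AB
  c.foldl (fun agg v =>
    agg.modify v (false, c) (fun bI =>
      (bI.1 || PySem.Set.issubset d (PySem.Set.add PySem.Set.empty v), PySem.Set.inter bI.2 c))) agg

def compute_poisoning_graph_alt (cycle_sets : List (List Int)) (R : List Int) (AB : List Int) : (List (Int × Int)) × List Int :=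
  let Rset := PySem.Set.ofList R
  let agg := cycle_sets.foldl (cpgStep AB) PySem.Dict.empty
  let res := R.foldl (fun (st : PySem.Dict Int Int × PySem.Set Int) w =>
    match agg.get? w with
    | none => st
    | some (b, I) =>
      if b then (st.1, PySem.Set.add st.2 w)
      else
        match PySem.Set.inter (PySem.Set.diff I (PySem.Set.add PySem.Set.empty w)) Rset with
        | [t] => (st.1.insert w t, st.2)
        | [] => (st.1, PySem.Set.add st.2 w)
        | _ => st) (PySem.Dict.empty, PySem.Set.empty)
  ((res.1).items, res.2)

-- ===== PRECONDITION & SPEC =====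
def Spec_compute_poisoning_graph (cycle_sets : List (List Int)) (R : List Int) (AB : List Int) (out : (List (Int × Int)) × List Int) : Prop := out = compute_poisoning_graph_alt cycle_sets R AB
instance (cycle_sets : List (List Int)) (R : List Int) (AB : List Int) (out : (List (Int × Int)) × List Int) : Decidable (Spec_compute_poisoning_graph cycle_sets R AB out) := by unfold Spec_compute_poisoning_graph; infer_instance

-- ===== CLAIM (what is proved, stated in full; the proofs are below) =====
def Claim_equal_compute_poisoning_graph : Prop := ∀ (cycle_sets : List (List Int)) (R : List Int) (AB : List Int), Dom_compute_poisoning_graph cycle_sets R AB → Spec_compute_poisoning_graph cycle_sets R AB (compute_poisoning_graph cycle_sets R AB)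

-- ===== LEMMAS AND PROOFS =====

theorem set_single (v : Int) : PySem.Set.add PySem.Set.empty v = [v] := by
  simp [PySem.Set.add, PySem.Set.empty, PySem.Set.contains]

theorem inter_inter_self (I c : List Int) :
    PySem.Set.inter (PySem.Set.inter I c) c = PySem.Set.inter I c := by
  simp [PySem.Set.inter, List.filter_filter]

-- the per-cycle update B applies at vertex v for cycle c
def cpgUpd (AB : List Int) (c : List Int) (v : Int) (p : Bool × List Int) : Bool × List Int :=
  (p.1 || PySem.Set.issubset (PySem.Set.diff c AB) (PySem.Set.add PySem.Set.empty v), PySem.Set.inter p.2 c)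

theorem cpgUpd_idem (AB c : List Int) (v : Int) (p : Bool × List Int) :
    cpgUpd AB c v (cpgUpd AB c v p) = cpgUpd AB c v p := by
  simp [cpgUpd, inter_inter_self]

-- L1 inner loop: what one cpgStep does to a single key
theorem cpgStep_inner (AB c : List Int) (v : Int) :
    ∀ (cs : List Int) (d : PySem.Dict Int (Bool × List Int)),
    (cs.foldl (fun agg u =>
        agg.modify u (false, c) (fun bI =>
          (bI.1 || PySem.Set.issubset (PySem.Set.diff c AB) (PySem.Set.add PySem.Set.empty u),
           PySem.Set.inter bI.2 c))) d : PySem.Dict Int (Bool × List Int)).get? v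
      = if cs.contains v then some (cpgUpd AB c v (d.getD v (false, c))) else d.get? v := by
  intro cs
  induction cs with
  | nil => intro d; simp
  | cons u cs ih =>
    intro d
    by_cases hv : u = v
    · subst hv
      simp only [List.foldl_cons, ih, List.contains_cons, BEq.rfl, Bool.true_or, if_true]
      by_cases hc : cs.contains u
      · simp only [hc, if_true]
        have hg : (PySem.Dict.modify d u (false, c) (fun bI =>
            (bI.1 || PySem.Set.issubset (PySem.Set.diff c AB) (PySem.Set.add PySem.Set.empty u),
             PySem.Set.inter bI.2 c))).getD u (false, c)
          = cpgUpd AB c u (d.getD u (false, c)) := by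
          simp [PySem.Dict.getD_modify_self, cpgUpd]
        rw [hg, cpgUpd_idem]
      · simp only [hc]
        simp [PySem.Dict.modify, PySem.Dict.get?_insert_self, cpgUpd]
    · simp only [List.foldl_cons, ih, List.contains_cons]
      have h1 : (PySem.Dict.modify d u (false, c) (fun bI =>
          (bI.1 || PySem.Set.issubset (PySem.Set.diff c AB) (PySem.Set.add PySem.Set.empty u),
           PySem.Set.inter bI.2 c))).getD v (false, c) = d.getD v (false, c) := by
        rw [PySem.Dict.getD_modify_of_ne]
        exact fun h => hv h.symm
      have h2 : (PySem.Dict.modify d u (false, c) (fun bI =>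
          (bI.1 || PySem.Set.issubset (PySem.Set.diff c AB) (PySem.Set.add PySem.Set.empty u),
           PySem.Set.inter bI.2 c))).get? v = d.get? v := by
        rw [PySem.Dict.modify, PySem.Dict.get?_insert_of_ne]
        exact fun h => hv h.symm
      have hb : (v == u) = false := beq_eq_false_iff_ne.mpr (Ne.symm hv)
      rw [h1, h2, hb, Bool.false_or]

theorem cpgStep_get? (AB : List Int) (d : PySem.Dict Int (Bool × List Int)) (c : List Int) (v : Int) :
    (cpgStep AB d c).get? v
      = if c.contains v then some (cpgUpd AB c v (d.getD v (false, c))) else d.get? v := by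
  simpa [cpgStep] using cpgStep_inner AB c v c d

-- abstract evolution of one key's entry along the cycles that contain it
def aggOf (AB : List Int) (v : Int) (o : Option (Bool × List Int)) (L : List (List Int)) :
    Option (Bool × List Int) :=
  L.foldl (fun o c => some (cpgUpd AB c v (o.getD (false, c)))) o

-- L2: the aggregation dict, characterised per key
theorem agg_get? (AB : List Int) (v : Int) :
    ∀ (L : List (List Int)) (d : PySem.Dict Int (Bool × List Int)),
    (L.foldl (cpgStep AB) d).get? v
      = aggOf AB v (d.get? v) (L.filter (fun c => c.contains v)) := by
  intro L
  induction L with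
  | nil => intro d; simp [aggOf]
  | cons c L ih =>
    intro d
    simp only [List.foldl_cons, ih]
    by_cases hc : c.contains v
    · rw [List.filter_cons_of_pos (by simpa using hc)]
      simp only [aggOf, List.foldl_cons]
      rw [cpgStep_get? AB d c v, if_pos hc, PySem.Dict.getD_eq_get?_getD]
    · rw [List.filter_cons_of_neg (by simpa using hc)]
      rw [cpgStep_get? AB d c v, if_neg hc]

theorem aggOf_some (AB : List Int) (v : Int) :
    ∀ (L : List (List Int)) (p : Bool × List Int),
    aggOf AB v (some p) L = some (L.foldl (fun p c => cpgUpd AB c v p) p) := by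
  intro L
  induction L with
  | nil => intro p; simp [aggOf]
  | cons c L ih => intro p; simpa [aggOf, List.foldl_cons] using ih _

theorem foldl_or_any (p : List Int → Bool) :
    ∀ (cs : List (List Int)) (b : Bool), cs.foldl (fun b c => b || p c) b = (b || cs.any p) := by
  intro cs
  induction cs with
  | nil => intro b; simp
  | cons c cs ih => intro b; simp [List.foldl_cons, ih, Bool.or_assoc]

-- L3: entry for a vertex with at least one cycle
theorem aggOf_none_cons (AB : List Int) (v : Int) (c₀ : List Int) (cs : List (List Int)) :
    aggOf AB v none (c₀ :: cs)
      = some (((c₀ :: cs).any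
                (fun c => PySem.Set.issubset (PySem.Set.diff c AB) (PySem.Set.add PySem.Set.empty v))),
              cs.foldl (fun I c => PySem.Set.inter I c) (PySem.Set.inter c₀ c₀)) := by
  have h0 : aggOf AB v none (c₀ :: cs)
      = aggOf AB v (some (cpgUpd AB c₀ v (false, c₀))) cs := by
    simp [aggOf]
  rw [h0, aggOf_some]
  have hp : cs.foldl (fun p c => cpgUpd AB c v p) (cpgUpd AB c₀ v (false, c₀))
      = (cs.foldl (fun b c => b || PySem.Set.issubset (PySem.Set.diff c AB) (PySem.Set.add PySem.Set.empty v)) (cpgUpd AB c₀ v (false, c₀)).1,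
         cs.foldl (fun I c => PySem.Set.inter I c) (cpgUpd AB c₀ v (false, c₀)).2) := by
    rw [← PySem.List.foldl_prod_mk]
    simp [cpgUpd]
  rw [hp]
  simp [cpgUpd, foldl_or_any, List.any_cons]

-- L5: the two subset tests agree pointwise
theorem hasab_eq (AB c : List Int) (w : Int) :
    PySem.Set.issubset c (PySem.Set.union (PySem.Set.add PySem.Set.empty w) AB)
      = PySem.Set.issubset (PySem.Set.diff c AB) (PySem.Set.add PySem.Set.empty w) := by
  rw [Bool.eq_iff_iff]
  rw [set_single w]
  simp only [PySem.Set.issubset_iff, PySem.Set.mem_union, PySem.Set.mem_diff, List.mem_singleton]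
  constructor
  · intro h x hx
    rcases h x hx.1 with h1 | h1
    · exact h1
    · exact absurd h1 hx.2
  · intro h x hx
    by_cases hab : x ∈ AB
    · exact Or.inr hab
    · exact Or.inl (h x ⟨hx, hab⟩)

theorem inter_self (c : List Int) : PySem.Set.inter c c = c := by
  simp [PySem.Set.inter]

-- L6: A's incremental intersection of (c−{w})∩R equals B's (∩cycles − {w})∩R, as lists
theorem common_eq (W Rs : List Int) :
    ∀ (cs : List (List Int)) (base : List Int),
    cs.foldl (fun s c => PySem.Set.inter s (PySem.Set.inter (PySem.Set.diff c W) Rs))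
        (PySem.Set.inter (PySem.Set.diff base W) Rs)
      = PySem.Set.inter (PySem.Set.diff (cs.foldl (fun I c => PySem.Set.inter I c) base) W) Rs := by
  intro cs
  induction cs with
  | nil => intro base; simp
  | cons c cs ih =>
    intro base
    simp only [List.foldl_cons]
    rw [← ih (PySem.Set.inter base c)]
    congr 1
    simp only [PySem.Set.inter, PySem.Set.diff, List.filter_filter]
    apply List.filter_congr
    intro x _
    rw [Bool.eq_iff_iff]
    simp only [Bool.and_eq_true, List.mem_filter,
      Bool.not_eq_eq_eq_not, Bool.not_true,
      PySem.Set.contains_eq_listContains, List.contains_eq_mem, decide_eq_true_eq,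
      decide_eq_false_iff_not]
    tauto

-- A's Option-accumulated intersection loop, made explicit
theorem optfold_some (rinc : List Int → List Int) :
    ∀ (cs : List (List Int)) (s : List Int),
    cs.foldl (fun (acc : Option (List Int)) c =>
        match acc with
        | none => some (rinc c)
        | some s => some (PySem.Set.inter s (rinc c))) (some s)
      = some (cs.foldl (fun s c => PySem.Set.inter s (rinc c)) s) := by
  intro cs
  induction cs with
  | nil => intro s; simp
  | cons c cs ih => intro s; simpa [List.foldl_cons] using ih _

-- the two per-w step functions agree
theorem step_eq (cycle_sets : List (List Int)) (R AB : List Int)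
    (st : PySem.Dict Int Int × PySem.Set Int) (w : Int) :
    (let w_cycles := get_vertex_3cycles cycle_sets w
     if w_cycles.isEmpty then st
     else if w_cycles.any (fun c => PySem.Set.issubset c (PySem.Set.union (PySem.Set.add PySem.Set.empty w) AB)) then
       (st.1, PySem.Set.add st.2 w)
     else
       let common_r := w_cycles.foldl (fun (acc : Option (List Int)) c =>
         let r_in_c := PySem.Set.inter (PySem.Set.diff c (PySem.Set.add PySem.Set.empty w)) (PySem.Set.ofList R)
         match acc with
         | none => some r_in_c
         | some s => some (PySem.Set.inter s r_in_c)) none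
       match common_r with
       | some s =>
         if s.length = 1 then (st.1.insert w s.headI, st.2)
         else if s.length = 0 then (st.1, PySem.Set.add st.2 w)
         else st
       | none => st)
    = (match (cycle_sets.foldl (cpgStep AB) PySem.Dict.empty).get? w with
       | none => st
       | some (b, I) =>
         if b then (st.1, PySem.Set.add st.2 w)
         else
           match PySem.Set.inter (PySem.Set.diff I (PySem.Set.add PySem.Set.empty w)) (PySem.Set.ofList R) with
           | [t] => (st.1.insert w t, st.2)
           | [] => (st.1, PySem.Set.add st.2 w)
           | _ => st) := by
  have hget : (cycle_sets.foldl (cpgStep AB) PySem.Dict.empty).get? w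
      = aggOf AB w none (cycle_sets.filter (fun c => c.contains w)) := by
    rw [agg_get?]; simp
  have hwc : get_vertex_3cycles cycle_sets w = cycle_sets.filter (fun c => c.contains w) := by
    simp [get_vertex_3cycles]
  rcases hfil : cycle_sets.filter (fun c => c.contains w) with _ | ⟨c₀, cs⟩
  · simp only [hwc, hfil, List.isEmpty_nil, if_true]
    rw [hget, hfil]
    simp [aggOf]
  · simp only [hwc, hfil, List.isEmpty_cons]
    rw [hget, hfil, aggOf_none_cons]
    have hany : (c₀ :: cs).any (fun c => PySem.Set.issubset c (PySem.Set.union (PySem.Set.add PySem.Set.empty w) AB))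
        = (c₀ :: cs).any (fun c => PySem.Set.issubset (PySem.Set.diff c AB) (PySem.Set.add PySem.Set.empty w)) := by
      apply PySem.List.any_congr_mem
      intro c _
      exact hasab_eq AB c w
    rw [hany]
    by_cases hb : (c₀ :: cs).any (fun c => PySem.Set.issubset (PySem.Set.diff c AB) (PySem.Set.add PySem.Set.empty w)) = true
    · rw [hb]
      simp
    · simp only [Bool.not_eq_true] at hb
      rw [hb]
      simp only [Bool.false_eq_true, if_false]

      have hfold : (c₀ :: cs).foldl (fun (acc : Option (List Int)) c =>
          match acc with
          | none => some (PySem.Set.inter (PySem.Set.diff c (PySem.Set.add PySem.Set.empty w)) (PySem.Set.ofList R))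
          | some s => some (PySem.Set.inter s (PySem.Set.inter (PySem.Set.diff c (PySem.Set.add PySem.Set.empty w)) (PySem.Set.ofList R)))) none
          = some (PySem.Set.inter (PySem.Set.diff (cs.foldl (fun I c => PySem.Set.inter I c) (PySem.Set.inter c₀ c₀)) (PySem.Set.add PySem.Set.empty w)) (PySem.Set.ofList R)) := by
        simp only [List.foldl_cons]
        rw [optfold_some, common_eq, inter_self]
      rw [hfold]
      rcases hs : PySem.Set.inter (PySem.Set.diff (cs.foldl (fun I c => PySem.Set.inter I c) (PySem.Set.inter c₀ c₀)) (PySem.Set.add PySem.Set.empty w)) (PySem.Set.ofList R) with _ | ⟨t, ts⟩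
      · simp only [List.length_nil]
        norm_num
      · rcases ts with _ | ⟨t', ts'⟩
        · simp only [List.length_cons, List.length_nil]
          norm_num [List.headI]
        · simp only [List.length_cons]
          have h2 : ¬ (ts'.length + 1 + 1 = 1) := by omega
          have h0 : ¬ (ts'.length + 1 + 1 = 0) := by omega
          simp only [h2, h0, if_false]

-- ===== VERDICT (by name: the statement is the Claim_ definition above) =====
theorem compute_poisoning_graph_spec : Claim_equal_compute_poisoning_graph := by
  intro cycle_sets R AB _
  unfold Spec_compute_poisoning_graph compute_poisoning_graph compute_poisoning_graph_alt
  have h : (fun (st : PySem.Dict Int Int × PySem.Set Int) w =>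
      let w_cycles := get_vertex_3cycles cycle_sets w
      if w_cycles.isEmpty then st
      else if w_cycles.any (fun c => PySem.Set.issubset c (PySem.Set.union (PySem.Set.add PySem.Set.empty w) AB)) then
        (st.1, PySem.Set.add st.2 w)
      else
        let common_r := w_cycles.foldl (fun (acc : Option (List Int)) c =>
          let r_in_c := PySem.Set.inter (PySem.Set.diff c (PySem.Set.add PySem.Set.empty w)) (PySem.Set.ofList R)
          match acc with
          | none => some r_in_c
          | some s => some (PySem.Set.inter s r_in_c)) none
        match common_r with
        | some s =>
          if s.length = 1 then (st.1.insert w s.headI, st.2)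
          else if s.length = 0 then (st.1, PySem.Set.add st.2 w)
          else st
        | none => st)
      = (fun (st : PySem.Dict Int Int × PySem.Set Int) w =>
        match (cycle_sets.foldl (cpgStep AB) PySem.Dict.empty).get? w with
        | none => st
        | some (b, I) =>
          if b then (st.1, PySem.Set.add st.2 w)
          else
            match PySem.Set.inter (PySem.Set.diff I (PySem.Set.add PySem.Set.empty w)) (PySem.Set.ofList R) with
            | [t] => (st.1.insert w t, st.2)
            | [] => (st.1, PySem.Set.add st.2 w)
            | _ => st) := by
    funext st w
    exact step_eq cycle_sets R AB st w
  rw [h]
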